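-- pv_equiv track=rewrite | github.com/feoshnce/PIA-Tubes-IF2224 | src/automaton/dfa/validator.py | _dead_states
-- ===== SOURCE A (Python) =====
-- from typing import Callable, Dict, Iterable, List, Optional, Set, Tuple
--
-- def _dead_states(
--     states: Set[str],
--     final_states: Set[str],
--     transitions: List[Tuple[str, str, str]],
-- ) -> Set[str]:
--     """
--     A 'dead' state here means: cannot reach ANY final state in the state graph.
--     Warning-only, because it might be intentional (e.g., sink states).
--     """
--     reverse_graph: Dict[str, Set[str]] = {}
--     for a, _sym, c in transitions:
--         reverse_graph.setdefault(c, set()).add(a)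
--
--     can_reach_final: Set[str] = set()
--     stack: List[str] = list(final_states)
--     while stack:
--         s = stack.pop()
--         if s in can_reach_final:
--             continue
--         can_reach_final.add(s)
--         for prev in reverse_graph.get(s, set()):
--             if prev not in can_reach_final:
--                 stack.append(prev)
--
--     # states that are not in can_reach_final are dead
--     return set(states) - can_reach_final
-- ===== SOURCE B (Python) =====
-- def _dead_states(states, final_states, transitions):
--     # No reverse graph: chaotic iteration to a fixpoint over the transition list.
--     can_reach = set(final_states)
--     changed = True
--     while changed:
--         changed = False
--         for a, _sym, c in transitions:
--             if c in can_reach and a not in can_reach: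
--                 can_reach.add(a)
--                 changed = True
--     return set(states) - can_reach
-- ===== Notes on version B (the rewrite author's own statement) =====
-- stated objective: alternative
-- what changed: Replaced building a reverse adjacency graph and running an explicit-stack DFS from the final states with a reverse-graph-free chaotic-iteration fixpoint: repeatedly sweep the transition list, adding sources whose target can already reach a final state, until a sweep adds nothing.
import Mathlib
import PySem

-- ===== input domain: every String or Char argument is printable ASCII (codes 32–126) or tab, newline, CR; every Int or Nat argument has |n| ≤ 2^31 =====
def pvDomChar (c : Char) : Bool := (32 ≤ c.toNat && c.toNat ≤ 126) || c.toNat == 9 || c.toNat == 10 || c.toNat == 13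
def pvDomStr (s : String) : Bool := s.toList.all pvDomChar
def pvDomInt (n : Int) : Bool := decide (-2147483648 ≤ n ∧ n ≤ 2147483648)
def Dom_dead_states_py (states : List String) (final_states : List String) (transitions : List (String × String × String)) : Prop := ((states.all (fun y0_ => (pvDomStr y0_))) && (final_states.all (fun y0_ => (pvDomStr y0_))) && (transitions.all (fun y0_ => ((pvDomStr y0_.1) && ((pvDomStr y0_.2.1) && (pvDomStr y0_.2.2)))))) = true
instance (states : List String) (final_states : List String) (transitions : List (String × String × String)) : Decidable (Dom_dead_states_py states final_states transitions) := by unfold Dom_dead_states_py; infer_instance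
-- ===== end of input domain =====

-- B replaces A's reverse-graph + explicit-stack DFS by a reverse-graph-free chaotic-iteration
-- fixpoint over the transition list (objective: alternative algorithm, similar cost).
-- Note: Python iterates sets in hash order; both results are sets, so only membership matters.

-- ===== PORT A =====
-- reverse_graph: for a, _sym, c in transitions: reverse_graph.setdefault(c, set()).add(a)
def pvRevGraph (transitions : List (String × String × String)) : PySem.Dict String (PySem.Set String) :=
  transitions.foldl
    (fun d t => d.insert t.2.2 (PySem.Set.add (d.getD t.2.2 PySem.Set.empty) t.1))
    PySem.Dict.empty

-- the while-stack DFS loop; head of the list is the top of the stack (a Python set's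
-- iteration order is unspecified, so list(final_states)/push order is an arbitrary choice);
-- fuel is only a totality guard: it is proved sufficient, the 0-case is never reached.
def pvDfsA (rg : PySem.Dict String (PySem.Set String)) :
    Nat → PySem.Set String → List String → PySem.Set String
  | _, visited, [] => visited
  | 0, visited, _ :: _ => visited
  | fuel+1, visited, s :: rest =>
    if PySem.Set.contains visited s then pvDfsA rg fuel visited rest
    else
      let visited' := PySem.Set.add visited s
      pvDfsA rg fuel visited'
        (((rg.getD s PySem.Set.empty).filter (fun p => !(PySem.Set.contains visited' p))) ++ rest)

def dead_states_py (states : List String) (final_states : List String) (transitions : List (String × String × String)) : List String :=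
  let rg := pvRevGraph transitions
  let fuel := (final_states.length + transitions.length) * (transitions.length + 1) + final_states.length + 1
  let canReach := pvDfsA rg fuel PySem.Set.empty final_states
  PySem.Set.diff (PySem.Set.ofList states) canReach

-- ===== PORT B =====
-- one sweep of 'for a, _sym, c in transitions: if c in can_reach and a not in can_reach: add, changed=True'
def pvPassB (transitions : List (String × String × String)) (s : PySem.Set String) :
    PySem.Set String × Bool :=
  transitions.foldl
    (fun acc t =>
      if PySem.Set.contains acc.1 t.2.2 && !(PySem.Set.contains acc.1 t.1)
      then (PySem.Set.add acc.1 t.1, true) else acc)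
    (s, false)

-- 'while changed' loop; fuel is a totality guard, proved sufficient (≤ |transitions|+1 sweeps).
def pvLoopB (transitions : List (String × String × String)) :
    Nat → PySem.Set String → PySem.Set String
  | 0, s => s
  | fuel+1, s =>
    let r := pvPassB transitions s
    if r.2 then pvLoopB transitions fuel r.1 else r.1

def dead_states_py_alt (states : List String) (final_states : List String) (transitions : List (String × String × String)) : List String :=
  let canReach := pvLoopB transitions (transitions.length + 1) (PySem.Set.ofList final_states)
  PySem.Set.diff (PySem.Set.ofList states) canReach

-- ===== PRECONDITION & SPEC =====
def Spec_dead_states_py (states : List String) (final_states : List String) (transitions : List (String × String × String)) (out : List String) : Prop := out = dead_states_py_alt states final_states transitions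
instance (states : List String) (final_states : List String) (transitions : List (String × String × String)) (out : List String) : Decidable (Spec_dead_states_py states final_states transitions out) := by unfold Spec_dead_states_py; infer_instance

-- ===== CLAIM (what is proved, stated in full; the proofs are below) =====
def Claim_equal_dead_states_py : Prop := ∀ (states : List String) (final_states : List String) (transitions : List (String × String × String)), Dom_dead_states_py states final_states transitions → Spec_dead_states_py states final_states transitions (dead_states_py states final_states transitions)

-- ===== LEMMAS AND PROOFS =====

-- edge a → c in the transition graph
def pvEdge (ts : List (String × String × String)) (a c : String) : Prop :=
  ∃ sym, (a, sym, c) ∈ ts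

-- 'can reach some final state'
def pvReach (ts : List (String × String × String)) (fs : List String) (x : String) : Prop :=
  ∃ f ∈ fs, Relation.ReflTransGen (pvEdge ts) x f

theorem pv_mem_revGraph_aux (l : List (String × String × String)) :
    ∀ (d : PySem.Dict String (PySem.Set String)) (a c : String),
    (a ∈ (l.foldl (fun d t => d.insert t.2.2 (PySem.Set.add (d.getD t.2.2 PySem.Set.empty) t.1)) d).getD c PySem.Set.empty ↔
     a ∈ d.getD c PySem.Set.empty ∨ ∃ sym, (a, sym, c) ∈ l) := by
  induction l with
  | nil => simp
  | cons t l ih =>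
    intro d a c
    obtain ⟨x, sym, z⟩ := t
    simp only [List.foldl_cons]
    rw [ih]
    rw [PySem.Dict.getD_insert]
    by_cases hc : c = z
    · subst hc
      simp [PySem.Set.mem_add, Prod.ext_iff]
      aesop
    · simp [hc, Prod.ext_iff]

theorem pv_mem_revGraph (ts : List (String × String × String)) (a c : String) :
    a ∈ (pvRevGraph ts).getD c PySem.Set.empty ↔ pvEdge ts a c := by
  unfold pvRevGraph pvEdge
  rw [pv_mem_revGraph_aux]
  simp [PySem.Dict.getD_empty, PySem.Set.empty]

theorem pv_len_revGraph_aux (l : List (String × String × String)) :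
    ∀ (d : PySem.Dict String (PySem.Set String)) (c : String),
    ((l.foldl (fun d t => d.insert t.2.2 (PySem.Set.add (d.getD t.2.2 PySem.Set.empty) t.1)) d).getD c PySem.Set.empty).length ≤
      (d.getD c PySem.Set.empty).length + l.length := by
  induction l with
  | nil => simp
  | cons t l ih =>
    intro d c
    simp only [List.foldl_cons]
    refine le_trans (ih _ c) ?_
    rw [PySem.Dict.getD_insert]
    by_cases hc : c = t.2.2
    · subst hc
      have : (PySem.Set.add ((d.getD t.2.2 PySem.Set.empty)) t.1).length ≤
          (d.getD t.2.2 PySem.Set.empty).length + 1 := by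
        unfold PySem.Set.add
        split <;> simp
      rw [if_pos rfl]
      simp only [List.length_cons]
      omega
    · simp [hc]

theorem pv_len_revGraph (ts : List (String × String × String)) (c : String) :
    ((pvRevGraph ts).getD c PySem.Set.empty).length ≤ ts.length := by
  have := pv_len_revGraph_aux ts PySem.Dict.empty c
  unfold pvRevGraph
  simpa [PySem.Dict.getD_empty, PySem.Set.empty] using this

theorem pv_revGraph_src (ts : List (String × String × String)) (a c : String)
    (h : a ∈ (pvRevGraph ts).getD c PySem.Set.empty) : a ∈ ts.map (·.1) := by
  obtain ⟨sym, hm⟩ := (pv_mem_revGraph ts a c).1 h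
  exact List.mem_map.2 ⟨(a, sym, c), hm, rfl⟩

theorem pv_filter_ne_lt {l : List String} {s : String} (h : s ∈ l) :
    (l.filter (fun x => !(x == s))).length < l.length := by
  induction l with
  | nil => cases h
  | cons y l ih =>
    by_cases hy : y = s
    · subst hy
      simp only [List.filter_cons, beq_self_eq_true, Bool.not_true]
      have := List.length_filter_le (fun x => !(x == y)) l
      simp at this ⊢
      omega
    · have hs : s ∈ l := by
        rcases List.mem_cons.1 h with h' | h'
        · exact absurd h'.symm hy
        · exact h'
      simp only [List.filter_cons, List.length_cons]
      have hb : (!(y == s)) = true := by simp [hy]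
      rw [hb]
      exact Nat.succ_lt_succ (ih hs)

theorem pv_dfsA_sound (ts : List (String × String × String)) (fs : List String) :
    ∀ (fuel : Nat) (visited : PySem.Set String) (stack : List String),
    (∀ x ∈ visited, pvReach ts fs x) → (∀ x ∈ stack, pvReach ts fs x) →
    ∀ x ∈ pvDfsA (pvRevGraph ts) fuel visited stack, pvReach ts fs x := by
  intro fuel
  induction fuel with
  | zero =>
    intro visited stack hv hs x hx
    cases stack <;> simp only [pvDfsA] at hx <;> exact hv x hx
  | succ fuel ih =>
    intro visited stack hv hs x hx
    cases stack with
    | nil => simp only [pvDfsA] at hx; exact hv x hx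
    | cons s rest =>
      by_cases hcs : PySem.Set.contains visited s = true
      · rw [show pvDfsA (pvRevGraph ts) (fuel+1) visited (s :: rest)
              = pvDfsA (pvRevGraph ts) fuel visited rest by
                simp only [pvDfsA]; rw [if_pos hcs]] at hx
        exact ih visited rest hv (fun y hy => hs y (List.mem_cons_of_mem _ hy)) x hx
      · rw [show pvDfsA (pvRevGraph ts) (fuel+1) visited (s :: rest)
              = pvDfsA (pvRevGraph ts) fuel (PySem.Set.add visited s)
                  ((((pvRevGraph ts).getD s PySem.Set.empty).filter
                    (fun p => !(PySem.Set.contains (PySem.Set.add visited s) p))) ++ rest)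
              by simp only [pvDfsA]; rw [if_neg hcs]] at hx
        have hsr : pvReach ts fs s := hs s List.mem_cons_self
        refine ih _ _ ?_ ?_ x hx
        · intro y hy
          rcases (PySem.Set.mem_add visited s y).1 hy with h' | h'
          · exact hv y h'
          · exact h' ▸ hsr
        · intro y hy
          rcases List.mem_append.1 hy with h' | h'
          · have hyrg : y ∈ (pvRevGraph ts).getD s PySem.Set.empty := (List.mem_filter.1 h').1
            obtain ⟨f, hf, hrt⟩ := hsr
            exact ⟨f, hf, Relation.ReflTransGen.head ((pv_mem_revGraph ts y s).1 hyrg) hrt⟩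
          · exact hs y (List.mem_cons_of_mem _ h')

theorem pv_dfsA_main (ts : List (String × String × String)) (fs : List String) :
    ∀ (fuel : Nat) (visited : PySem.Set String) (stack : List String),
    ((fs ++ ts.map (·.1)).filter (fun x => !(PySem.Set.contains visited x))).length * (ts.length + 1) + stack.length ≤ fuel →
    (∀ x ∈ stack, x ∈ fs ++ ts.map (·.1)) →
    (∀ x ∈ visited, ∀ a, pvEdge ts a x → a ∈ visited ∨ a ∈ stack) →
    (∀ x ∈ visited, x ∈ pvDfsA (pvRevGraph ts) fuel visited stack) ∧
    (∀ x ∈ stack, x ∈ pvDfsA (pvRevGraph ts) fuel visited stack) ∧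
    (∀ x ∈ pvDfsA (pvRevGraph ts) fuel visited stack, ∀ a, pvEdge ts a x →
       a ∈ pvDfsA (pvRevGraph ts) fuel visited stack) := by
  intro fuel
  induction fuel with
  | zero =>
    intro visited stack hmu hstU hinv
    cases stack with
    | nil =>
      refine ⟨fun x hx => hx, fun x hx => (List.not_mem_nil hx).elim, fun x hx a ha => ?_⟩
      rcases hinv x hx a ha with h' | h'
      · exact h'
      · exact (List.not_mem_nil h').elim
    | cons s rest => simp at hmu
  | succ fuel ih =>
    intro visited stack hmu hstU hinv
    cases stack with
    | nil =>
      refine ⟨fun x hx => hx, fun x hx => (List.not_mem_nil hx).elim, fun x hx a ha => ?_⟩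
      rcases hinv x hx a ha with h' | h'
      · exact h'
      · exact (List.not_mem_nil h').elim
    | cons s rest =>
      by_cases hcs : PySem.Set.contains visited s = true
      · have hres : pvDfsA (pvRevGraph ts) (fuel+1) visited (s :: rest)
            = pvDfsA (pvRevGraph ts) fuel visited rest := by
          simp only [pvDfsA]; rw [if_pos hcs]
        have hmu' : ((fs ++ ts.map (·.1)).filter (fun x => !(PySem.Set.contains visited x))).length * (ts.length + 1) + rest.length ≤ fuel := by
          simp only [List.length_cons] at hmu; omega
        have hinv' : ∀ x ∈ visited, ∀ a, pvEdge ts a x → a ∈ visited ∨ a ∈ rest := by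
          intro x hx a ha
          rcases hinv x hx a ha with h' | h'
          · exact Or.inl h'
          · rcases List.mem_cons.1 h' with h'' | h''
            · exact Or.inl (h'' ▸ (PySem.Set.contains_iff visited s).1 hcs)
            · exact Or.inr h''
        obtain ⟨h1, h2, h3⟩ := ih visited rest hmu' (fun x hx => hstU x (List.mem_cons_of_mem _ hx)) hinv'
        rw [hres]
        refine ⟨h1, fun x hx => ?_, h3⟩
        rcases List.mem_cons.1 hx with h' | h'
        · exact h' ▸ h1 s ((PySem.Set.contains_iff visited s).1 hcs)
        · exact h2 x h'
      · have hsnot : s ∉ visited := fun h => hcs ((PySem.Set.contains_iff visited s).2 h)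
        have hvis' : PySem.Set.add visited s = visited ++ [s] := PySem.Set.add_of_not_mem hsnot
        have hres : pvDfsA (pvRevGraph ts) (fuel+1) visited (s :: rest)
            = pvDfsA (pvRevGraph ts) fuel (PySem.Set.add visited s)
                ((((pvRevGraph ts).getD s PySem.Set.empty).filter
                  (fun p => !(PySem.Set.contains (PySem.Set.add visited s) p))) ++ rest) := by
          simp only [pvDfsA]; rw [if_neg hcs]
        have hcont' : ∀ x, PySem.Set.contains (PySem.Set.add visited s) x
            = (PySem.Set.contains visited x || x == s) := by
          intro x
          rw [Bool.eq_iff_iff]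
          simp [PySem.Set.mem_add]
        have hfilt : (fs ++ ts.map (·.1)).filter (fun x => !(PySem.Set.contains (PySem.Set.add visited s) x))
            = ((fs ++ ts.map (·.1)).filter (fun x => !(PySem.Set.contains visited x))).filter (fun x => !(x == s)) := by
          rw [List.filter_filter]
          apply List.filter_congr
          intro x _
          rw [hcont' x, Bool.not_or]
          exact Bool.and_comm _ _
        have hsU : s ∈ fs ++ ts.map (·.1) := hstU s List.mem_cons_self
        have hsfilt : s ∈ (fs ++ ts.map (·.1)).filter (fun x => !(PySem.Set.contains visited x)) :=
          List.mem_filter.2 ⟨hsU, by simp at hcs ⊢; exact hcs⟩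
        have hlt : ((fs ++ ts.map (·.1)).filter (fun x => !(PySem.Set.contains (PySem.Set.add visited s) x))).length
            < ((fs ++ ts.map (·.1)).filter (fun x => !(PySem.Set.contains visited x))).length := by
          rw [hfilt]; exact pv_filter_ne_lt hsfilt
        have hpush : (((pvRevGraph ts).getD s PySem.Set.empty).filter
            (fun p => !(PySem.Set.contains (PySem.Set.add visited s) p))).length ≤ ts.length :=
          le_trans (List.length_filter_le _ _) (pv_len_revGraph ts s)
        have hmu' : ((fs ++ ts.map (·.1)).filter (fun x => !(PySem.Set.contains (PySem.Set.add visited s) x))).length * (ts.length + 1)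
            + ((((pvRevGraph ts).getD s PySem.Set.empty).filter
                (fun p => !(PySem.Set.contains (PySem.Set.add visited s) p))) ++ rest).length ≤ fuel := by
          have h2 : (((fs ++ ts.map (·.1)).filter (fun x => !(PySem.Set.contains (PySem.Set.add visited s) x))).length + 1) * (ts.length + 1)
              ≤ ((fs ++ ts.map (·.1)).filter (fun x => !(PySem.Set.contains visited x))).length * (ts.length + 1) :=
            Nat.mul_le_mul_right _ (Nat.succ_le_of_lt hlt)
          rw [Nat.succ_mul] at h2
          simp only [List.length_append, List.length_cons] at hmu ⊢
          omega
        have hstU' : ∀ x ∈ (((pvRevGraph ts).getD s PySem.Set.empty).filter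
            (fun p => !(PySem.Set.contains (PySem.Set.add visited s) p))) ++ rest, x ∈ fs ++ ts.map (·.1) := by
          intro x hx
          rcases List.mem_append.1 hx with h' | h'
          · exact List.mem_append.2 (Or.inr (pv_revGraph_src ts x s (List.mem_filter.1 h').1))
          · exact hstU x (List.mem_cons_of_mem _ h')
        have hinv' : ∀ x ∈ PySem.Set.add visited s, ∀ a, pvEdge ts a x →
            a ∈ PySem.Set.add visited s ∨ a ∈ (((pvRevGraph ts).getD s PySem.Set.empty).filter
              (fun p => !(PySem.Set.contains (PySem.Set.add visited s) p))) ++ rest := by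
          intro x hx a ha
          rcases (PySem.Set.mem_add visited s x).1 hx with h' | h'
          · rcases hinv x h' a ha with h'' | h''
            · exact Or.inl ((PySem.Set.mem_add visited s a).2 (Or.inl h''))
            · rcases List.mem_cons.1 h'' with h3 | h3
              · exact Or.inl ((PySem.Set.mem_add visited s a).2 (Or.inr h3))
              · exact Or.inr (List.mem_append.2 (Or.inr h3))
          · subst h'
            have harg : a ∈ (pvRevGraph ts).getD x PySem.Set.empty := (pv_mem_revGraph ts a x).2 ha
            by_cases hav : a ∈ PySem.Set.add visited x
            · exact Or.inl hav
            · refine Or.inr (List.mem_append.2 (Or.inl (List.mem_filter.2 ⟨harg, ?_⟩)))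
              simp only [Bool.not_eq_true']
              exact Bool.not_eq_true _ ▸ (by
                intro hcc
                exact hav ((PySem.Set.contains_iff _ a).1 hcc))
        obtain ⟨h1, h2, h3⟩ := ih (PySem.Set.add visited s) _ hmu' hstU' hinv'
        rw [hres]
        refine ⟨fun x hx => h1 x ((PySem.Set.mem_add visited s x).2 (Or.inl hx)), fun x hx => ?_, h3⟩
        rcases List.mem_cons.1 hx with h' | h'
        · exact h' ▸ h1 s ((PySem.Set.mem_add visited s s).2 (Or.inr rfl))
        · exact h2 x (List.mem_append.2 (Or.inr h'))

theorem pv_passB_grow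
    (l : List (String × String × String)) :
    ∀ (acc : PySem.Set String × Bool) (x : String),
    x ∈ acc.1 → x ∈ (l.foldl (fun acc t =>
      if PySem.Set.contains acc.1 t.2.2 && !(PySem.Set.contains acc.1 t.1)
      then (PySem.Set.add acc.1 t.1, true) else acc) acc).1 := by
  induction l with
  | nil => intro acc x hx; exact hx
  | cons t l ih =>
    intro acc x hx
    simp only [List.foldl_cons]
    apply ih
    split
    · exact (PySem.Set.mem_add acc.1 t.1 x).2 (Or.inl hx)
    · exact hx

theorem pv_passB_subset
    (l : List (String × String × String)) :
    ∀ (acc : PySem.Set String × Bool) (x : String),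
    x ∈ (l.foldl (fun acc t =>
      if PySem.Set.contains acc.1 t.2.2 && !(PySem.Set.contains acc.1 t.1)
      then (PySem.Set.add acc.1 t.1, true) else acc) acc).1 →
    x ∈ acc.1 ∨ x ∈ l.map (·.1) := by
  induction l with
  | nil => intro acc x hx; exact Or.inl hx
  | cons t l ih =>
    intro acc x hx
    simp only [List.foldl_cons] at hx
    rcases ih _ x hx with h' | h'
    · by_cases hc : (PySem.Set.contains acc.1 t.2.2 && !(PySem.Set.contains acc.1 t.1)) = true
      · rw [if_pos hc] at h'
        rcases (PySem.Set.mem_add acc.1 t.1 x).1 h' with h'' | h''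
        · exact Or.inl h''
        · exact Or.inr (by simp [h''])
      · rw [if_neg hc] at h'
        exact Or.inl h'
    · exact Or.inr (List.mem_cons_of_mem _ h')

theorem pv_passB_sound (ts : List (String × String × String)) (fs : List String) :
    ∀ (l : List (String × String × String)) (acc : PySem.Set String × Bool),
    (∀ t ∈ l, t ∈ ts) → (∀ x ∈ acc.1, pvReach ts fs x) →
    ∀ x ∈ (l.foldl (fun acc t =>
      if PySem.Set.contains acc.1 t.2.2 && !(PySem.Set.contains acc.1 t.1)
      then (PySem.Set.add acc.1 t.1, true) else acc) acc).1, pvReach ts fs x := by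
  intro l
  induction l with
  | nil => intro acc _ hacc x hx; exact hacc x hx
  | cons t l ih =>
    intro acc hl hacc x hx
    simp only [List.foldl_cons] at hx
    refine ih _ (fun u hu => hl u (List.mem_cons_of_mem _ hu)) ?_ x hx
    intro y hy
    by_cases hc : (PySem.Set.contains acc.1 t.2.2 && !(PySem.Set.contains acc.1 t.1)) = true
    · rw [if_pos hc] at hy
      rcases (PySem.Set.mem_add acc.1 t.1 y).1 hy with h' | h'
      · exact hacc y h'
      · subst h'
        have hc2 : t.2.2 ∈ acc.1 :=
          (PySem.Set.contains_iff acc.1 t.2.2).1 (Bool.and_elim_left hc)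
        obtain ⟨f, hf, hrt⟩ := hacc t.2.2 hc2
        exact ⟨f, hf, Relation.ReflTransGen.head
          ⟨t.2.1, by simpa using hl t List.mem_cons_self⟩ hrt⟩
    · rw [if_neg hc] at hy
      exact hacc y hy

theorem pv_passB_nodup (l : List (String × String × String)) :
    ∀ (acc : PySem.Set String × Bool), acc.1.Nodup →
    ((l.foldl (fun acc t =>
      if PySem.Set.contains acc.1 t.2.2 && !(PySem.Set.contains acc.1 t.1)
      then (PySem.Set.add acc.1 t.1, true) else acc) acc).1).Nodup := by
  induction l with
  | nil => intro acc h; exact h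
  | cons t l ih =>
    intro acc h
    simp only [List.foldl_cons]
    apply ih
    split
    · exact PySem.Set.nodup_add acc.1 t.1 h
    · exact h

theorem pv_passB_false (l : List (String × String × String)) :
    ∀ (acc : PySem.Set String × Bool),
    (l.foldl (fun acc t =>
      if PySem.Set.contains acc.1 t.2.2 && !(PySem.Set.contains acc.1 t.1)
      then (PySem.Set.add acc.1 t.1, true) else acc) acc).2 = false →
    (l.foldl (fun acc t =>
      if PySem.Set.contains acc.1 t.2.2 && !(PySem.Set.contains acc.1 t.1)
      then (PySem.Set.add acc.1 t.1, true) else acc) acc).1 = acc.1 ∧ acc.2 = false ∧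
    ∀ t ∈ l, t.2.2 ∈ acc.1 → t.1 ∈ acc.1 := by
  induction l with
  | nil => intro acc h; exact ⟨rfl, h, by simp⟩
  | cons t l ih =>
    intro acc h
    simp only [List.foldl_cons] at h ⊢
    by_cases hc : (PySem.Set.contains acc.1 t.2.2 && !(PySem.Set.contains acc.1 t.1)) = true
    · rw [if_pos hc] at h
      obtain ⟨_, h2, _⟩ := ih _ h
      simp at h2
    · rw [if_neg hc] at h ⊢
      obtain ⟨h1, h2, h3⟩ := ih _ h
      refine ⟨h1, h2, fun u hu hmem => ?_⟩
      rcases List.mem_cons.1 hu with h' | h'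
      · subst h'
        by_contra hnm
        apply hc
        simp only [Bool.and_eq_true, Bool.not_eq_true']
        constructor
        · exact (PySem.Set.contains_iff acc.1 u.2.2).2 hmem
        · exact Bool.not_eq_true _ ▸ (by
            intro hcc
            exact hnm ((PySem.Set.contains_iff acc.1 u.1).1 hcc))
      · exact h3 u h' hmem

theorem pv_passB_len_mono (l : List (String × String × String)) :
    ∀ (acc : PySem.Set String × Bool),
    acc.1.length ≤ ((l.foldl (fun acc t =>
      if PySem.Set.contains acc.1 t.2.2 && !(PySem.Set.contains acc.1 t.1)
      then (PySem.Set.add acc.1 t.1, true) else acc) acc).1).length := by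
  induction l with
  | nil => intro acc; exact le_refl _
  | cons t l ih =>
    intro acc
    simp only [List.foldl_cons]
    refine le_trans ?_ (ih _)
    split
    · rename_i hc
      have hnm : t.1 ∉ acc.1 := by
        have hb := Bool.and_elim_right hc
        intro hm
        rw [(PySem.Set.contains_iff acc.1 t.1).2 hm] at hb
        simp at hb
      rw [PySem.Set.add_of_not_mem hnm]
      simp
    · exact le_refl _

theorem pv_passB_true_len (l : List (String × String × String)) :
    ∀ (acc : PySem.Set String × Bool),
    (l.foldl (fun acc t =>
      if PySem.Set.contains acc.1 t.2.2 && !(PySem.Set.contains acc.1 t.1)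
      then (PySem.Set.add acc.1 t.1, true) else acc) acc).2 = true →
    acc.2 = false →
    acc.1.length < ((l.foldl (fun acc t =>
      if PySem.Set.contains acc.1 t.2.2 && !(PySem.Set.contains acc.1 t.1)
      then (PySem.Set.add acc.1 t.1, true) else acc) acc).1).length := by
  induction l with
  | nil =>
    intro acc h h2
    simp only [List.foldl_nil] at h
    rw [h] at h2
    cases h2
  | cons t l ih =>
    intro acc h h2
    simp only [List.foldl_cons] at h ⊢
    by_cases hc : (PySem.Set.contains acc.1 t.2.2 && !(PySem.Set.contains acc.1 t.1)) = true
    · rw [if_pos hc] at h ⊢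
      have hnm : t.1 ∉ acc.1 := by
        have hb := Bool.and_elim_right hc
        intro hm
        rw [(PySem.Set.contains_iff acc.1 t.1).2 hm] at hb
        simp at hb
      have hlen : acc.1.length < (PySem.Set.add acc.1 t.1).length := by
        rw [PySem.Set.add_of_not_mem hnm]; simp
      exact lt_of_lt_of_le hlen (pv_passB_len_mono l ((PySem.Set.add acc.1 t.1), true))
    · rw [if_neg hc] at h ⊢
      exact ih _ h h2

theorem pv_nodup_subset_len {l l' : List String} (hnd : l.Nodup) (hsub : ∀ x ∈ l, x ∈ l') :
    l.length ≤ (PySem.Set.ofList l').length := by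
  have h1 : l.toFinset.card = l.length := List.toFinset_card_of_nodup hnd
  have h2 : (PySem.Set.ofList l').toFinset.card = (PySem.Set.ofList l').length :=
    List.toFinset_card_of_nodup (PySem.Set.nodup_ofList l')
  have h3 : l.toFinset ⊆ (PySem.Set.ofList l').toFinset := by
    intro x hx
    rw [List.mem_toFinset] at *
    exact (PySem.Set.mem_ofList l' x).2 (hsub x (by simpa using hx))
  have := Finset.card_le_card h3
  omega

theorem pv_loopB_main (ts : List (String × String × String)) (fs : List String) :
    ∀ (fuel : Nat) (s : PySem.Set String),
    s.Nodup → (∀ x ∈ s, x ∈ fs ++ ts.map (·.1)) →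
    (PySem.Set.ofList (fs ++ ts.map (·.1))).length + 1 ≤ fuel + s.length →
    (∀ x ∈ s, pvReach ts fs x) →
    (∀ x ∈ s, x ∈ pvLoopB ts fuel s) ∧
    (∀ x ∈ pvLoopB ts fuel s, pvReach ts fs x) ∧
    (∀ t ∈ ts, t.2.2 ∈ pvLoopB ts fuel s → t.1 ∈ pvLoopB ts fuel s) := by
  intro fuel
  induction fuel with
  | zero =>
    intro s hnd hsub hbud _
    exact absurd (pv_nodup_subset_len hnd hsub) (by omega)
  | succ fuel ih =>
    intro s hnd hsub hbud hsound
    rcases hr2 : (pvPassB ts s).2 with _ | _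
    · have hres : pvLoopB ts (fuel+1) s = (pvPassB ts s).1 := by
        simp only [pvLoopB]; rw [hr2]; simp
      obtain ⟨h1, _, h3⟩ := pv_passB_false ts (s, false) hr2
      rw [hres]
      unfold pvPassB
      rw [h1]
      exact ⟨fun x hx => hx, hsound, h3⟩
    · have hres : pvLoopB ts (fuel+1) s = pvLoopB ts fuel (pvPassB ts s).1 := by
        simp only [pvLoopB]; rw [hr2]; simp
      have hgrow : ∀ x ∈ s, x ∈ (pvPassB ts s).1 := fun x hx => pv_passB_grow ts (s, false) x hx
      have hlen : s.length < ((pvPassB ts s).1).length := pv_passB_true_len ts (s, false) hr2 rfl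
      have hnd' : ((pvPassB ts s).1).Nodup := pv_passB_nodup ts (s, false) hnd
      have hsub' : ∀ x ∈ (pvPassB ts s).1, x ∈ fs ++ ts.map (·.1) := by
        intro x hx
        rcases pv_passB_subset ts (s, false) x hx with h' | h'
        · exact hsub x h'
        · exact List.mem_append.2 (Or.inr h')
      have hsound' : ∀ x ∈ (pvPassB ts s).1, pvReach ts fs x :=
        pv_passB_sound ts fs ts (s, false) (fun t ht => ht) hsound
      obtain ⟨h1, h2, h3⟩ := ih (pvPassB ts s).1 hnd' hsub' (by omega) hsound'
      rw [hres]
      exact ⟨fun x hx => h1 x (hgrow x hx), h2, h3⟩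

theorem pv_reach_mem (ts : List (String × String × String)) (fs : List String)
    (W : List String) (hfs : ∀ f ∈ fs, f ∈ W)
    (hcl : ∀ c ∈ W, ∀ a, pvEdge ts a c → a ∈ W) :
    ∀ x, pvReach ts fs x → x ∈ W := by
  intro x ⟨f, hf, hrt⟩
  induction hrt using Relation.ReflTransGen.head_induction_on with
  | refl => exact hfs f hf
  | head h' _ ih => exact hcl _ ih _ h'

-- membership agreement of the two can-reach sets, then equality of the filtered results
theorem pv_len_update_le (l : List String) :
    ∀ (s : PySem.Set String), (PySem.Set.update s l).length ≤ s.length + l.length := by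
  induction l with
  | nil => intro s; simp [PySem.Set.update]
  | cons x xs ih =>
    intro s
    rw [PySem.Set.update_cons]
    refine le_trans (ih _) ?_
    have : (PySem.Set.add s x).length ≤ s.length + 1 := by
      rw [PySem.Set.add_eq_ite]
      split <;> simp
    simp only [List.length_cons]
    omega

-- membership agreement of the two can-reach sets, then equality of the filtered results
theorem pv_can_agree (fs : List String) (ts : List (String × String × String)) :
    ∀ x, x ∈ pvDfsA (pvRevGraph ts)
            ((fs.length + ts.length) * (ts.length + 1) + fs.length + 1) PySem.Set.empty fs ↔
         x ∈ pvLoopB ts (ts.length + 1) (PySem.Set.ofList fs) := by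
  have hemp : ∀ x : String, x ∉ (PySem.Set.empty : PySem.Set String) := by
    intro x hx; cases hx
  have hfilt : ((fs ++ ts.map (·.1)).filter
      (fun x => !(PySem.Set.contains (PySem.Set.empty : PySem.Set String) x))) = fs ++ ts.map (·.1) :=
    List.filter_eq_self.2 (fun a _ => by simp [PySem.Set.contains, PySem.Set.empty])
  have hmu : ((fs ++ ts.map (·.1)).filter
      (fun x => !(PySem.Set.contains (PySem.Set.empty : PySem.Set String) x))).length * (ts.length + 1)
      + fs.length ≤ (fs.length + ts.length) * (ts.length + 1) + fs.length + 1 := by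
    rw [hfilt]
    simp only [List.length_append, List.length_map]
    omega
  obtain ⟨hA1, hA2, hA3⟩ := pv_dfsA_main ts fs
    ((fs.length + ts.length) * (ts.length + 1) + fs.length + 1) PySem.Set.empty fs
    hmu (fun x hx => List.mem_append.2 (Or.inl hx)) (fun x hx => absurd hx (hemp x))
  have hAsound := pv_dfsA_sound ts fs
    ((fs.length + ts.length) * (ts.length + 1) + fs.length + 1) PySem.Set.empty fs
    (fun x hx => absurd hx (hemp x)) (fun f hf => ⟨f, hf, Relation.ReflTransGen.refl⟩)
  have hbud : (PySem.Set.ofList (fs ++ ts.map (·.1))).length + 1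
      ≤ (ts.length + 1) + (PySem.Set.ofList fs).length := by
    rw [PySem.Set.ofList_append]
    have := pv_len_update_le (ts.map (·.1)) (PySem.Set.ofList fs)
    simp only [List.length_map] at this
    omega
  obtain ⟨hB1, hB2, hB3⟩ := pv_loopB_main ts fs (ts.length + 1) (PySem.Set.ofList fs)
    (PySem.Set.nodup_ofList fs)
    (fun x hx => List.mem_append.2 (Or.inl ((PySem.Set.mem_ofList fs x).1 hx)))
    hbud
    (fun x hx => ⟨x, (PySem.Set.mem_ofList fs x).1 hx, Relation.ReflTransGen.refl⟩)
  intro x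
  constructor
  · intro hx
    refine pv_reach_mem ts fs _ (fun f hf => hB1 f ((PySem.Set.mem_ofList fs f).2 hf)) ?_ x
      (hAsound x hx)
    intro c hc a ⟨sym, hmem⟩
    exact hB3 (a, sym, c) hmem hc
  · intro hx
    refine pv_reach_mem ts fs _ (fun f hf => hA2 f hf) ?_ x (hB2 x hx)
    intro c hc a ha
    exact hA3 c hc a ha

-- ===== VERDICT (by name: the statement is the Claim_ definition above) =====
theorem dead_states_py_spec : Claim_equal_dead_states_py := by
  intro states fs ts _
  unfold Spec_dead_states_py dead_states_py dead_states_py_alt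
  simp only [PySem.Set.diff]
  exact List.filter_congr (fun x _ => by
    have h := pv_can_agree fs ts x
    by_cases hx : x ∈ pvLoopB ts (ts.length + 1) (PySem.Set.ofList fs) <;>
      simp [PySem.Set.contains, PySem.Set.empty, hx] at * <;> exact h)
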